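-- pv_equiv track=rewrite | github.com/miliar/Code_Jam_Webscraper | solutions_python/solutions_year12_round0_nr3/1758.py | isMirroredNumber
-- ===== SOURCE A (Python) =====
-- def isMirroredNumber(a, b):
--     distinctPairs=[]
--     if len(a) < 2:
--         if a == b:
--             return 1
--         else:
--             return 0
--     pos = 1
--     count = 0
--     while pos < len(a):
--         if a[pos:] + a[:pos] == b:
--             if not a[pos:]+a[:pos] + ":" + b in distinctPairs:
--                 distinctPairs.append(a[pos:]+a[:pos] + ":" + b)
--                 count+=1
--         pos+=1
--     return count
-- ===== SOURCE B (Python) =====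
-- def isMirroredNumber(a, b):
--     # nontrivial-rotation test via substring search in the doubled string
--     if len(a) < 2:
--         return 1 if a == b else 0
--     if len(b) != len(a):
--         return 0
--     return 1 if b in (a + a)[1:-1] else 0
-- ===== Notes on version B (the rewrite author's own statement) =====
-- stated objective: faster
-- what changed: A scans all rotation offsets, building each rotated string and a dedup list (the dedup key is constant, so A's count is always 0 or 1); B replaces the whole loop by the classic doubled-string test: b is a nontrivial rotation of a iff len(b)==len(a) and b is a substring of (a+a)[1:-1], using Python's C-level substring search.
import Mathlib
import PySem

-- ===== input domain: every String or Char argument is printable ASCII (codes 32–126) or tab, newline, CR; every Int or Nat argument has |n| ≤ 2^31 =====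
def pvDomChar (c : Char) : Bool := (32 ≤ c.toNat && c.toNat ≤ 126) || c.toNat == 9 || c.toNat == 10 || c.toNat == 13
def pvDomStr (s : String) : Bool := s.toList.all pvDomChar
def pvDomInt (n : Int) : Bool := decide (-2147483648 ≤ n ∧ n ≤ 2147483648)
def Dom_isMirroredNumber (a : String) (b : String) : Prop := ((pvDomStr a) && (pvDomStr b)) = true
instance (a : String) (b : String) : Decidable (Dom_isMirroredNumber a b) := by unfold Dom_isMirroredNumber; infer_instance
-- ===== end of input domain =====

-- B replaces A's rotation-by-rotation scan (with its dedup list) by the doubled-string substring test (objective: faster).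

-- ===== PORT A =====
-- one iteration of A's while loop; state = (distinctPairs, count)
def pvStepA (al bl : List Char) (s : List (List Char) × Int) (pos : Int) : List (List Char) × Int :=
  if PySem.List.slice al (some pos) none ++ PySem.List.slice al none (some pos) = bl then
    if (PySem.List.slice al (some pos) none ++ PySem.List.slice al none (some pos)) ++ [':'] ++ bl ∉ s.1 then
      (s.1 ++ [(PySem.List.slice al (some pos) none ++ PySem.List.slice al none (some pos)) ++ [':'] ++ bl], s.2 + 1)
    else s
  else s

def isMirroredNumber (a : String) (b : String) : Int :=
  if a.toList.length < 2 then
    if a.toList = b.toList then 1 else 0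
  else
    ((PySem.List.pyRange 1 (a.toList.length : Int) 1).foldl (pvStepA a.toList b.toList) ([], 0)).2

-- ===== PORT B =====
def isMirroredNumber_alt (a : String) (b : String) : Int :=
  if a.toList.length < 2 then
    if a.toList = b.toList then 1 else 0
  else if b.toList.length ≠ a.toList.length then 0
  else if PySem.Chars.isIn b.toList (PySem.List.slice (a.toList ++ a.toList) (some 1) (some (-1))) then 1
  else 0

-- ===== PRECONDITION & SPEC =====
def Spec_isMirroredNumber (a : String) (b : String) (out : Int) : Prop := out = isMirroredNumber_alt a b
instance (a : String) (b : String) (out : Int) : Decidable (Spec_isMirroredNumber a b out) := by unfold Spec_isMirroredNumber; infer_instance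

-- ===== CLAIM (what is proved, stated in full; the proofs are below) =====
def Claim_equal_isMirroredNumber : Prop := ∀ (a : String) (b : String), Dom_isMirroredNumber a b → Spec_isMirroredNumber a b (isMirroredNumber a b)

-- ===== LEMMAS AND PROOFS =====

-- xs[1:-1] is drop-first-then-drop-last
theorem pvMid (xs : List Char) (h : 2 ≤ xs.length) :
    PySem.List.slice xs (some 1) (some (-1)) = (xs.drop 1).dropLast := by
  have h1 : PySem.List.clampIdx xs.length 1 = 1 := by
    simp [PySem.List.clampIdx]; omega
  have h2 : PySem.List.clampIdx xs.length (-1) = xs.length - 1 := by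
    simp only [PySem.List.clampIdx, if_pos (by omega : (-1:Int) < 0),
      if_neg (by omega : ¬ ((xs.length : Int) + -1 < 0))]
    omega
  simp only [PySem.List.slice, h1, h2, List.dropLast_eq_take, List.length_drop]

-- a rotation read off the doubled list
theorem pvRotDoubled (al : List Char) (p : Nat) (hp : p ≤ al.length) :
    ((al ++ al).drop p).take al.length = al.drop p ++ al.take p := by
  rw [List.drop_append_of_le_length hp, List.take_append]
  have h1 : (al.drop p).length = al.length - p := by simp
  rw [List.take_of_length_le (by omega), h1]
  have : al.length - (al.length - p) = p := by omega
  rw [this]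

-- crux: b is a nontrivial rotation of a iff b occurs inside (a+a) with the first and last character cut off
theorem pvRotIffInfix (al bl : List Char) (h2 : 2 ≤ al.length) (hlen : bl.length = al.length) :
    (∃ q : Nat, 1 ≤ q ∧ q < al.length ∧ al.drop q ++ al.take q = bl) ↔
      bl <:+: ((al ++ al).drop 1).dropLast := by
  constructor
  · rintro ⟨q, hq1, hqn, hrot⟩
    have hsplit : al ++ al = al.take q ++ (bl ++ al.drop q) := by
      rw [← hrot, ← List.append_assoc, ← List.append_assoc, List.take_append_drop,
        List.append_assoc, List.take_append_drop]
    have hprene : al.take q ≠ [] := by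
      intro h
      have : (al.take q).length = 0 := by rw [h]; rfl
      rw [List.length_take] at this; omega
    have hsufne : al.drop q ≠ [] := by
      intro h
      have : (al.drop q).length = 0 := by rw [h]; rfl
      rw [List.length_drop] at this; omega
    obtain ⟨c, pre', hpre⟩ := List.exists_cons_of_ne_nil hprene
    obtain ⟨ys, d, hyd⟩ : ∃ ys d, al.drop q = ys ++ [d] :=
      ⟨(al.drop q).dropLast, (al.drop q).getLast hsufne,
        (List.dropLast_concat_getLast hsufne).symm⟩
    rw [hpre, hyd] at hsplit
    refine ⟨pre', ys, ?_⟩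
    rw [hsplit]
    rw [show (c :: pre') ++ (bl ++ (ys ++ [d])) = c :: ((pre' ++ bl ++ ys) ++ [d]) by
      simp [List.append_assoc]]
    simp
  · rintro ⟨s, t, hst⟩
    have hne : al ++ al ≠ [] := by
      intro h
      have : (al ++ al).length = 0 := by rw [h]; rfl
      rw [List.length_append] at this; omega
    obtain ⟨c, rest, hx⟩ := List.exists_cons_of_ne_nil hne
    have hrestne : rest ≠ [] := by
      intro h
      have := congrArg List.length hx
      rw [h] at this; simp at this; omega
    obtain ⟨ys, d, hyd⟩ : ∃ ys d, rest = ys ++ [d] :=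
      ⟨rest.dropLast, rest.getLast hrestne, (List.dropLast_concat_getLast hrestne).symm⟩
    rw [hyd] at hx
    have hmid : ((al ++ al).drop 1).dropLast = ys := by rw [hx]; simp
    rw [hmid] at hst
    have hx2 : al ++ al = (c :: s) ++ bl ++ (t ++ [d]) := by
      rw [hx, ← hst]; simp [List.append_assoc]
    have hlen2 : (c :: s).length + bl.length + (t.length + 1) = 2 * al.length := by
      have := congrArg List.length hx2
      simp at this ⊢; omega
    refine ⟨(c :: s).length, by simp, by simp at hlen2 ⊢; omega, ?_⟩
    have hdrop : (al ++ al).drop (c :: s).length = bl ++ (t ++ [d]) := by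
      rw [hx2, List.append_assoc, List.drop_left]
    have h3 := pvRotDoubled al (c :: s).length (by simp at hlen2 ⊢; omega)
    rw [hdrop] at h3
    rw [← h3, ← hlen, List.take_left]

-- once a match was recorded the state is a fixed point of A's loop body
theorem pvStepA_absorb (al bl : List Char) (l : List Int) :
    l.foldl (pvStepA al bl) ([bl ++ [':'] ++ bl], 1) = ([bl ++ [':'] ++ bl], 1) := by
  induction l with
  | nil => rfl
  | cons p t ih =>
    rw [List.foldl_cons]
    have hstep : pvStepA al bl ([bl ++ [':'] ++ bl], 1) p = ([bl ++ [':'] ++ bl], 1) := by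
      unfold pvStepA
      by_cases h1 : PySem.List.slice al (some p) none ++ PySem.List.slice al none (some p) = bl
      · rw [if_pos h1, if_neg (by rw [h1]; simp)]
      · rw [if_neg h1]
    rw [hstep, ih]

-- A's loop from the empty start state: 1 iff some offset matches
theorem pvFoldA_spec (al bl : List Char) (l : List Int) :
    l.foldl (pvStepA al bl) ([], 0) =
      (if ∃ p ∈ l, PySem.List.slice al (some p) none ++ PySem.List.slice al none (some p) = bl
       then ([bl ++ [':'] ++ bl], 1) else ([], 0)) := by
  induction l with
  | nil => simp
  | cons p t ih =>
    rw [List.foldl_cons]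
    by_cases h : PySem.List.slice al (some p) none ++ PySem.List.slice al none (some p) = bl
    · have hstep : pvStepA al bl ([], 0) p = ([bl ++ [':'] ++ bl], 1) := by
        unfold pvStepA
        rw [if_pos h, if_pos (by simp)]
        simp [h]
      rw [hstep, pvStepA_absorb, if_pos ⟨p, by simp, h⟩]
    · have hstep : pvStepA al bl ([], 0) p = ([], 0) := by
        unfold pvStepA
        rw [if_neg h]
      rw [hstep, ih]
      have hiff : (∃ x ∈ p :: t, PySem.List.slice al (some x) none ++ PySem.List.slice al none (some x) = bl)
          ↔ ∃ x ∈ t, PySem.List.slice al (some x) none ++ PySem.List.slice al none (some x) = bl := by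
        rw [List.exists_mem_cons_iff]; simp [h]
      rw [if_congr hiff rfl rfl]

-- A's loop range as a Nat-indexed rotation search
theorem pvExistsIff (al bl : List Char) :
    (∃ p ∈ PySem.List.pyRange 1 (al.length : Int) 1,
        PySem.List.slice al (some p) none ++ PySem.List.slice al none (some p) = bl)
      ↔ ∃ q : Nat, 1 ≤ q ∧ q < al.length ∧ al.drop q ++ al.take q = bl := by
  constructor
  · rintro ⟨p, hp, hrot⟩
    rw [PySem.List.mem_pyRange_one] at hp
    rw [PySem.List.slice_from _ (by omega), PySem.List.slice_to _ (by omega)] at hrot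
    exact ⟨p.toNat, by omega, by omega, hrot⟩
  · rintro ⟨q, hq1, hqn, hrot⟩
    refine ⟨(q : Int), PySem.List.mem_pyRange_one.mpr ⟨by omega, by omega⟩, ?_⟩
    rw [PySem.List.slice_from _ (by omega), PySem.List.slice_to _ (by omega)]
    simpa using hrot

-- any rotation taken in A's loop has a's length
theorem pvRotLen (al : List Char) (q : Nat) (hq : q ≤ al.length) :
    (al.drop q ++ al.take q).length = al.length := by
  simp; omega

-- ===== VERDICT (by name: the statement is the Claim_ definition above) =====
theorem isMirroredNumber_spec : Claim_equal_isMirroredNumber := by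
  intro a b _
  unfold Spec_isMirroredNumber isMirroredNumber isMirroredNumber_alt
  by_cases h2 : a.toList.length < 2
  · rw [if_pos h2, if_pos h2]
  · rw [if_neg h2, if_neg h2]
    rw [not_lt] at h2
    rw [pvFoldA_spec]
    by_cases hlen : b.toList.length = a.toList.length
    · rw [if_neg (by omega : ¬ b.toList.length ≠ a.toList.length)]
      rw [pvMid (a.toList ++ a.toList) (by rw [List.length_append]; omega)]
      have hmain := pvRotIffInfix a.toList b.toList h2 hlen
      by_cases hrot : ∃ q : Nat, 1 ≤ q ∧ q < a.toList.length ∧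
          a.toList.drop q ++ a.toList.take q = b.toList
      · rw [if_pos ((pvExistsIff a.toList b.toList).mpr hrot),
          if_pos ((PySem.Chars.isIn_iff_infix _ _).mpr (hmain.mp hrot))]
      · rw [if_neg (fun hc => hrot ((pvExistsIff a.toList b.toList).mp hc)),
          if_neg (by rw [PySem.Chars.isIn_iff_infix]; exact fun hc => hrot (hmain.mpr hc))]
    · rw [if_pos hlen]
      rw [if_neg]
      rintro ⟨p, hp, hrot⟩
      rw [PySem.List.mem_pyRange_one] at hp
      rw [PySem.List.slice_from _ (by omega), PySem.List.slice_to _ (by omega)] at hrot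
      have := pvRotLen a.toList p.toNat (by omega)
      rw [hrot] at this
      exact hlen this
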